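-- pv_equiv track=rewrite | github.com/subhasishadhikary435-tech/Mini_Search_Index | searcher.py | and_query
-- ===== SOURCE A (Python) =====
-- from collections import defaultdict
--
-- def and_query(terms, inv):
--     """Return dict doc_id -> score where docs contain ALL terms. Score = sum of freqs."""
--     doc_scores = defaultdict(int)
--     sets = []
--     for t in terms:
--         postings = inv.get(t, [])
--         # postings may have string keys if loaded from JSON; ensure ints
--         sets.append({int(doc_id) for doc_id, _ in postings})
--     if not sets:
--         return {}
--     common = set.intersection(*sets)
--     for t in terms:
--         for doc_id, freq in inv.get(t, []):
--             if int(doc_id) in common: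
--                 doc_scores[int(doc_id)] += int(freq)
--     return dict(sorted(doc_scores.items(), key=lambda x: -x[1]))
-- ===== SOURCE B (Python) =====
-- def and_query(terms, inv):
--     """Return dict doc_id -> score where docs contain ALL terms. Score = sum of freqs."""
--     if not terms:
--         return {}
--     score = {}
--     count = {}
--     for t in terms:
--         postings = inv.get(t, [])
--         for doc_id, freq in postings:
--             d = int(doc_id)
--             score[d] = score.get(d, 0) + int(freq)
--         for d in {int(doc_id) for doc_id, _ in postings}:
--             count[d] = count.get(d, 0) + 1
--     n = len(terms)
--     kept = {d: s for d, s in score.items() if count.get(d) == n}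
--     return dict(sorted(kept.items(), key=lambda x: -x[1]))
-- ===== Notes on version B (the rewrite author's own statement) =====
-- stated objective: alternative
-- what changed: Replaced A's build-per-term doc-id sets + global set.intersection + re-scan scoring pass with a single combined pass that sums scores and counts per-term membership in two running dicts, keeping only docs whose term-count equals len(terms).
import Mathlib
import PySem

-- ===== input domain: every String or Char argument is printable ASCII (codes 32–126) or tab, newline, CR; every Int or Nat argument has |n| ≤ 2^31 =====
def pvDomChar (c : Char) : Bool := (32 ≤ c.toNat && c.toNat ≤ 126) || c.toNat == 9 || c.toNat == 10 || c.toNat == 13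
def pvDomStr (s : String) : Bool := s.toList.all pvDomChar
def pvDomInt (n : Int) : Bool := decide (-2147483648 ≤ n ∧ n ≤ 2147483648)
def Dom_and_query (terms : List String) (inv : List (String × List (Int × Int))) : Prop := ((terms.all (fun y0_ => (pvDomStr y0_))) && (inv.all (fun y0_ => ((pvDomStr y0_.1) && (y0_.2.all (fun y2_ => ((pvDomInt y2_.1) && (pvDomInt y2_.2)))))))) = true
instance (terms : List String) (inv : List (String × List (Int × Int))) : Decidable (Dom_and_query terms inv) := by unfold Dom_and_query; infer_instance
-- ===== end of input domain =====

-- B replaces A's intersection-of-sets pass with one combined scoring/term-counting pass and a final count==len(terms) filter (objective: alternative decomposition, same cost).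
-- In both ports the final Python 'dict(...)' over pairs with distinct keys is the identity on the association list.

-- ===== PORT A =====
def and_query (terms : List String) (inv : List (String × List (Int × Int))) : List (Int × Int) :=
  let dinv := PySem.Dict.mk inv
  let sets : List (PySem.Set Int) :=
    terms.foldl (fun acc t => acc ++ [PySem.Set.ofList ((dinv.getD t []).map (·.1))]) []
  match sets with
  | [] => []
  | s0 :: rest =>
    let common := rest.foldl PySem.Set.inter s0
    let docScores : PySem.Dict Int Int :=
      terms.foldl (fun d t =>
        (dinv.getD t []).foldl (fun d p =>
          if common.contains p.1 then d.modify p.1 0 (· + p.2) else d) d)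
        PySem.Dict.empty
    PySem.List.sorted docScores.items (fun x => -x.2) false

-- ===== PORT B =====
def and_query_alt (terms : List String) (inv : List (String × List (Int × Int))) : List (Int × Int) :=
  if terms = [] then []
  else
    let dinv := PySem.Dict.mk inv
    let st := terms.foldl (fun (st : PySem.Dict Int Int × PySem.Dict Int Int) t =>
        ((dinv.getD t []).foldl (fun d p => d.modify p.1 0 (· + p.2)) st.1,
         (PySem.Set.ofList ((dinv.getD t []).map (·.1))).foldl
            (fun d x => d.modify x 0 (· + 1)) st.2))
      (PySem.Dict.empty, PySem.Dict.empty)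
    let n : Int := terms.length
    let kept := st.1.items.filter (fun p => st.2.get? p.1 == some n)
    PySem.List.sorted kept (fun x => -x.2) false

-- ===== PRECONDITION & SPEC =====
def Spec_and_query (terms : List String) (inv : List (String × List (Int × Int))) (out : List (Int × Int)) : Prop := out = and_query_alt terms inv
instance (terms : List String) (inv : List (String × List (Int × Int))) (out : List (Int × Int)) : Decidable (Spec_and_query terms inv out) := by unfold Spec_and_query; infer_instance

-- ===== CLAIM (what is proved, stated in full; the proofs are below) =====
def Claim_equal_and_query : Prop := ∀ (terms : List String) (inv : List (String × List (Int × Int))), Dom_and_query terms inv → Spec_and_query terms inv (and_query terms inv)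

-- ===== LEMMAS AND PROOFS =====

-- nested loop over a list of lists = one loop over the flattened list
lemma foldl_foldl_flatMap {α β σ : Type} (g : α → List β) (f : σ → β → σ) (l : List α) (s : σ) :
    l.foldl (fun s a => (g a).foldl f s) s = (l.flatMap g).foldl f s := by
  induction l generalizing s with
  | nil => rfl
  | cons a l ih => simp [List.flatMap_cons, List.foldl_append, ih]

-- value accumulated by a score loop: sum of the freqs at that key
lemma getD_foldl_modify_sum (l : List (Int × Int)) (d : PySem.Dict Int Int) (k : Int) :
    (l.foldl (fun d p => d.modify p.1 0 (· + p.2)) d).getD k 0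
      = d.getD k 0 + ((l.filter (fun p => p.1 == k)).map (·.2)).sum := by
  induction l generalizing d with
  | nil => simp
  | cons p l ih =>
    simp only [List.foldl_cons, ih, List.filter_cons]
    by_cases h : p.1 = k
    · simp [h]
      ring
    · simp [h, PySem.Dict.getD_modify, Ne.symm h]

lemma mem_foldl_inter (l : List (PySem.Set Int)) (s : PySem.Set Int) (y : Int) :
    y ∈ l.foldl PySem.Set.inter s ↔ y ∈ s ∧ ∀ u ∈ l, y ∈ u := by
  induction l generalizing s with
  | nil => simp
  | cons u l ih => simp [ih, PySem.Set.mem_inter]; tauto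

lemma ofList_filter (q : Int → Bool) (xs : List Int) :
    PySem.Set.ofList (xs.filter q) = (PySem.Set.ofList xs).filter q := by
  induction xs using List.reverseRecOn with
  | nil => rfl
  | append_singleton xs x ih =>
    rw [List.filter_append, List.filter_singleton, PySem.Set.ofList_append_singleton]
    by_cases h : q x
    · simp only [h, cond_true]
      rw [PySem.Set.ofList_append_singleton, ih]
      simp only [PySem.Set.add, PySem.Set.contains_eq_listContains, List.contains_eq_mem,
        List.mem_filter]
      by_cases hm : x ∈ PySem.Set.ofList xs
      · simp [hm, h]
      · simp [hm, h, List.filter_append]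
    · have h' : q x = false := by simpa using h
      simp only [h', cond_false, List.append_nil, ih]
      simp only [PySem.Set.add, PySem.Set.contains_eq_listContains, List.contains_eq_mem]
      by_cases hm : x ∈ PySem.Set.ofList xs
      · simp [hm]
      · simp [hm, List.filter_append, h']

-- 0/1 sums are countP
lemma sum_map_ite_mem (l : List String) (S : String → List Int) (k : Int) :
    (l.map (fun t => if k ∈ S t then (1:Nat) else 0)).sum
      = l.countP (fun t => decide (k ∈ S t)) := by
  induction l with
  | nil => rfl
  | cons t l ih =>
    by_cases h : k ∈ S t <;> simp [h, ih, Nat.add_comm]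

-- the whole equivalence, over an abstract postings map P, for a nonempty term list
lemma master (t0 : String) (ts : List String) (P : String → List (Int × Int)) :
    PySem.List.sorted
      ((List.foldl (fun d t => List.foldl
          (fun d p => if (List.foldl PySem.Set.inter
                (PySem.Set.ofList ((P t0).map (fun x => x.1)))
                (ts.map (fun x => PySem.Set.ofList ((P x).map (fun x => x.1))))).contains p.1 = true
              then d.modify p.1 0 (fun x => x + p.2) else d)
          d (P t)) PySem.Dict.empty (t0 :: ts)).items)
      (fun x => -x.2) false
    = PySem.List.sorted
        (List.filter
          (fun p => ((t0 :: ts).foldl (fun d t => List.foldl (fun d x => d.modify x 0 (fun x => x + 1)) d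
              (PySem.Set.ofList ((P t).map (fun x => x.1)))) PySem.Dict.empty).get? p.1
            == some ((t0 :: ts).length : Int))
          ((List.foldl (fun d t => List.foldl (fun d p => d.modify p.1 0 (fun x => x + p.2)) d (P t))
              PySem.Dict.empty (t0 :: ts)).items))
        (fun x => -x.2) false := by
  set l : List String := t0 :: ts with hl
  set S : String → PySem.Set Int := fun t => PySem.Set.ofList ((P t).map (fun x => x.1)) with hS
  set common : PySem.Set Int := List.foldl PySem.Set.inter (S t0) (ts.map S) with hcommon
  set cc : Int × Int → Bool := fun p => common.contains p.1 with hcc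
  set c : Int → Bool := fun k => common.contains k with hc
  set ap : List (Int × Int) := l.flatMap P with hap
  set flat : List Int := l.flatMap S with hflat
  set DA : PySem.Dict Int Int := List.foldl (fun d t => List.foldl
      (fun d p => if common.contains p.1 = true then d.modify p.1 0 (fun x => x + p.2) else d) d (P t))
      PySem.Dict.empty l with hDAdef
  set score : PySem.Dict Int Int := List.foldl
      (fun d t => List.foldl (fun d p => d.modify p.1 0 (fun x => x + p.2)) d (P t))
      PySem.Dict.empty l with hscoredef
  set cnt : PySem.Dict Int Int := List.foldl
      (fun d t => List.foldl (fun d x => d.modify x 0 (fun x => x + 1)) d (S t))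
      PySem.Dict.empty l with hcntdef
  -- flattened forms
  have hDA : DA = ((ap.filter cc).foldl (fun d p => d.modify p.1 0 (fun x => x + p.2)) PySem.Dict.empty) := by
    rw [hap, List.filter_flatMap, ← foldl_foldl_flatMap, hDAdef]
    simp only [List.foldl_filter, hcc]
  have hscore : score = ap.foldl (fun d p => d.modify p.1 0 (fun x => x + p.2)) PySem.Dict.empty := by
    rw [hscoredef, hap, ← foldl_foldl_flatMap]
  have hcnt : cnt = flat.foldl (fun d x => d.modify x 0 (fun x => x + 1)) PySem.Dict.empty := by
    rw [hcntdef, hflat, ← foldl_foldl_flatMap]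
  -- keys
  have hkS : score.keys = PySem.Set.ofList (ap.map (fun x => x.1)) := by
    rw [hscore, PySem.Dict.keys_foldl_modify_key, PySem.Dict.keys_empty, PySem.Set.update_nil_left]
  have hkfilt : (ap.filter cc).map (fun x => x.1) = (ap.map (fun x => x.1)).filter c := by
    rw [List.filter_map]; rfl
  have hkA : DA.keys = (PySem.Set.ofList (ap.map (fun x => x.1))).filter c := by
    rw [hDA, PySem.Dict.keys_foldl_modify_key, PySem.Dict.keys_empty, PySem.Set.update_nil_left,
      hkfilt, ofList_filter]
  have hkC : cnt.keys = PySem.Set.ofList flat := by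
    rw [hcnt, PySem.Dict.keys_foldl_modify, PySem.Dict.keys_empty, PySem.Set.update_nil_left]
  have hnS : score.keys.Nodup := by rw [hkS]; exact PySem.Set.nodup_ofList _
  have hnA : DA.keys.Nodup := by rw [hkA]; exact (PySem.Set.nodup_ofList _).filter _
  -- values
  have hvS : ∀ k : Int, score.getD k 0 = ((ap.filter (fun p => p.1 == k)).map (fun x => x.2)).sum := by
    intro k
    rw [hscore, getD_foldl_modify_sum, PySem.Dict.getD_empty, zero_add]
  have hvA : ∀ k : Int, DA.getD k 0
      = (((ap.filter cc).filter (fun p => p.1 == k)).map (fun x => x.2)).sum := by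
    intro k
    rw [hDA, getD_foldl_modify_sum, PySem.Dict.getD_empty, zero_add]
  have hvC : ∀ k : Int, cnt.getD k 0 = (flat.count k : Int) := by
    intro k
    rw [hcnt, PySem.Dict.getD_foldl_modify_add_one, PySem.Dict.getD_empty, zero_add]
  -- membership transfer between the key list and the flattened set list
  have hmem : ∀ k : Int, k ∈ ap.map (fun x => x.1) ↔ k ∈ flat := by
    intro k
    rw [hap, hflat, List.map_flatMap]
    simp only [List.mem_flatMap, hS, PySem.Set.mem_ofList]
  -- common = "in every term's doc set"
  have hcom : ∀ k : Int, (common.contains k = true) ↔ ∀ t ∈ l, k ∈ S t := by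
    intro k
    rw [hcommon, PySem.Set.contains_iff, mem_foldl_inter]
    simp only [List.forall_mem_map, hl, List.forall_mem_cons]
  -- the count predicate = membership in every term's doc set
  have hcnteq : ∀ k : Int, (flat.count k = l.length ↔ ∀ t ∈ l, k ∈ S t) := by
    intro k
    rw [hflat, List.count_flatMap]
    have : (List.map (List.count k ∘ S) l) = l.map (fun t => if k ∈ S t then (1:Nat) else 0) := by
      apply List.map_congr_left
      intro t _
      have hnd : (S t).Nodup := by rw [hS]; exact PySem.Set.nodup_ofList _
      by_cases m : k ∈ S t
      · simp only [Function.comp_apply, m, if_pos]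
        exact List.count_eq_one_of_mem hnd m
      · simp [Function.comp, m, List.count_eq_zero_of_not_mem m]
    rw [this, sum_map_ite_mem, List.countP_eq_length]
    simp
  -- the two filter predicates agree on the score keys
  have hpred : ∀ k ∈ PySem.Set.ofList (ap.map (fun x => x.1)),
      (cnt.get? k == some (l.length : Int)) = c k := by
    intro k hk
    have hkf : k ∈ flat := (hmem k).mp ((PySem.Set.mem_ofList _ _).mp hk)
    have hcontains : cnt.contains k = true := by
      rw [PySem.Dict.contains_iff_mem_keys, hkC]
      exact (PySem.Set.mem_ofList _ _).mpr hkf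
    have hget : cnt.get? k = some (cnt.getD k 0) := by
      rw [PySem.Dict.contains_eq_isSome_get?] at hcontains
      cases hg : cnt.get? k with
      | none => rw [hg] at hcontains; simp at hcontains
      | some v => rw [PySem.Dict.getD_eq_get?_getD, hg]; rfl
    rw [hget, hvC k]
    rw [Bool.eq_iff_iff]
    simp only [beq_iff_eq, Option.some.injEq, Nat.cast_inj, hcnteq k, hc, hcom k]
  -- per-key values agree on common keys
  have hval : ∀ k : Int, c k = true → DA.getD k 0 = score.getD k 0 := by
    intro k hck
    have hck' : common.contains k = true := by simpa only [hc] using hck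
    rw [hvA k, hvS k, List.filter_filter]
    have hfeq : List.filter (fun a => (a.1 == k) && cc a) ap = List.filter (fun p => p.1 == k) ap := by
      apply List.filter_congr
      intro a _
      by_cases h : a.1 = k
      · have hca : cc a = true := by simp only [hcc]; rw [h]; exact hck'
        simp [h, hca]
      · simp [h]
    rw [hfeq]
  -- the items lists are equal
  have hitems : DA.items = score.items.filter
      (fun p => cnt.get? p.1 == some (l.length : Int)) := by
    rw [PySem.Dict.items_eq_map_keys score hnS 0, List.filter_map]
    have hcomp : ((fun p => cnt.get? p.1 == some (l.length : Int)) ∘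
        (fun k => (k, score.getD k 0))) = fun k => (cnt.get? k == some (l.length : Int)) := rfl
    rw [hcomp, hkS, List.filter_congr hpred]
    rw [PySem.Dict.items_eq_map_keys DA hnA 0, hkA]
    apply List.map_congr_left
    intro k hkmem
    have hck : c k = true := (List.mem_filter.mp hkmem).2
    rw [hval k hck]
  rw [hitems]

-- the single equivalence, nonempty terms
lemma ports_eq (terms : List String) (inv : List (String × List (Int × Int))) :
    and_query terms inv = and_query_alt terms inv := by
  cases terms with
  | nil => rfl
  | cons t0 ts =>
    unfold and_query and_query_alt
    simp only [PySem.List.foldl_append_singleton_eq_map, List.nil_append, List.map_cons,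
      reduceCtorEq]
    have hsplit : ∀ (L : List String) (a b : PySem.Dict Int Int),
        L.foldl (fun st t =>
          (List.foldl (fun d p => d.modify p.1 0 fun x => x + p.2) st.1 ((PySem.Dict.mk inv).getD t []),
           List.foldl (fun d x => d.modify x 0 fun x => x + 1) st.2
             (PySem.Set.ofList (((PySem.Dict.mk inv).getD t []).map (fun x => x.1)))))
          (a, b)
        = (L.foldl (fun d t => List.foldl (fun d p => d.modify p.1 0 fun x => x + p.2) d
              ((PySem.Dict.mk inv).getD t [])) a,
           L.foldl (fun d t => List.foldl (fun d x => d.modify x 0 fun x => x + 1) d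
              (PySem.Set.ofList (((PySem.Dict.mk inv).getD t []).map (fun x => x.1)))) b) := by
      intro L
      induction L with
      | nil => intro a b; rfl
      | cons x L ih => intro a b; simp only [List.foldl_cons, ih]
    rw [hsplit]
    simp only [if_false]
    exact master t0 ts (fun t => (PySem.Dict.mk inv).getD t [])
-- ===== VERDICT (by name: the statement is the Claim_ definition above) =====
theorem and_query_spec : Claim_equal_and_query := by
  intro terms inv _
  unfold Spec_and_query
  exact ports_eq terms inv
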